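-- pv_equiv track=rewrite | github.com/heitor57/bio-clustering | src/lib/metrics.py | clustering_tfpn
-- ===== SOURCE A (Python) =====
-- def clustering_tfpn(actual,predicted):
--     tfpn_ = {
--         'tp':0,
--         'fp':0,
--         'tn':0,
--         'fn':0,
--     }
--
--     for i in range(len(predicted)):
--         for j in range(len(predicted)):
--             if j>i:
--                 if predicted[i]==predicted[j]:
--                     if actual[i]==actual[j]:
--                         tfpn_['tp']+=1
--                     else:
--                         tfpn_['fp']+=1
--                 else:
--                     if actual[i]==actual[j]:
--                         tfpn_['fn']+=1
--                     else:
--                         tfpn_['tn']+=1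
--     return tfpn_
-- ===== SOURCE B (Python) =====
-- def clustering_tfpn(actual, predicted):
--     # One pass with hash counters: pair counts come from counter lookups
--     # instead of comparing every pair of indices.
--     tp = sp = sa = seen = 0
--     cb = {}
--     cp = {}
--     ca = {}
--     for a, p in zip(actual, predicted):
--         tp += cb.get((a, p), 0)
--         sp += cp.get(p, 0)
--         sa += ca.get(a, 0)
--         cb[(a, p)] = cb.get((a, p), 0) + 1
--         cp[p] = cp.get(p, 0) + 1
--         ca[a] = ca.get(a, 0) + 1
--         seen += 1
--     total = seen * (seen - 1) // 2
--     fn = sa - tp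
--     return {'tp': tp, 'fp': sp - tp, 'tn': total - sp - fn, 'fn': fn}
-- ===== Notes on version B (the rewrite author's own statement) =====
-- stated objective: faster
-- what changed: Replaces the O(n^2) double loop over all index pairs by a single pass that keeps hash-map counters of labels, predicted labels and (label, predicted) pairs, accumulating same-cluster pair counts incrementally and deriving tn from the total pair count n*(n-1)//2.
import Mathlib
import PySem

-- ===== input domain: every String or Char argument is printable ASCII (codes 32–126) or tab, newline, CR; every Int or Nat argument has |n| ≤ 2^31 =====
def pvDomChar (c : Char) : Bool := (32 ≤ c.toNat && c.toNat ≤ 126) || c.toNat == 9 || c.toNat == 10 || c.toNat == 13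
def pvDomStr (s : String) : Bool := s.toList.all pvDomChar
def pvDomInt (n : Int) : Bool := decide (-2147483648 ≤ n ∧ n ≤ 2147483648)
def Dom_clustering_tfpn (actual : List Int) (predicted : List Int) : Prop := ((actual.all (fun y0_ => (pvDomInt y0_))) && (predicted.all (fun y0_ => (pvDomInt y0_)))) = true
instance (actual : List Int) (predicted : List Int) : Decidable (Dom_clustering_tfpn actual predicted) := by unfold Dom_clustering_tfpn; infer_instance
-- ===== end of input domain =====

-- B replaces A's O(n^2) scan over all index pairs by one O(n) pass with hash
-- counters and pair-count algebra (objective: faster, asymptotic).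

-- ===== PORT A =====
def clustering_tfpn (actual : List Int) (predicted : List Int) : List (String × Int) :=
  let tfpn0 : PySem.Dict String Int :=
    PySem.Dict.ofList [("tp", 0), ("fp", 0), ("tn", 0), ("fn", 0)]
  let n : Int := predicted.length
  -- indices produced by range(len(predicted)) are in range for predicted;
  -- Pre_ makes them in range for actual too, so pyGetD's default is never used
  let d := (PySem.List.pyRange 0 n 1).foldl (fun d i =>
    (PySem.List.pyRange 0 n 1).foldl (fun d j =>
      if i < j then
        if PySem.List.pyGetD predicted i 0 == PySem.List.pyGetD predicted j 0 then
          if PySem.List.pyGetD actual i 0 == PySem.List.pyGetD actual j 0 then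
            d.modify "tp" 0 (· + 1)
          else
            d.modify "fp" 0 (· + 1)
        else
          if PySem.List.pyGetD actual i 0 == PySem.List.pyGetD actual j 0 then
            d.modify "fn" 0 (· + 1)
          else
            d.modify "tn" 0 (· + 1)
      else d) d) tfpn0
  d.items

-- ===== PORT B =====
def clustering_tfpn_alt (actual : List Int) (predicted : List Int) : List (String × Int) :=
  let s := (actual.zip predicted).foldl
    (fun (s : (Int × Int × Int × Int) ×
              PySem.Dict (Int × Int) Int × PySem.Dict Int Int × PySem.Dict Int Int) x =>
      ((s.1.1 + s.2.1.getD x 0,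
        s.1.2.1 + s.2.2.1.getD x.2 0,
        s.1.2.2.1 + s.2.2.2.getD x.1 0,
        s.1.2.2.2 + 1),
       s.2.1.insert x (s.2.1.getD x 0 + 1),
       s.2.2.1.insert x.2 (s.2.2.1.getD x.2 0 + 1),
       s.2.2.2.insert x.1 (s.2.2.2.getD x.1 0 + 1)))
    ((0, 0, 0, 0), PySem.Dict.empty, PySem.Dict.empty, PySem.Dict.empty)
  let tp := s.1.1
  let sp := s.1.2.1
  let sa := s.1.2.2.1
  let seen := s.1.2.2.2
  let total := PySem.Int.floordiv (seen * (seen - 1)) 2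
  let fn := sa - tp
  [("tp", tp), ("fp", sp - tp), ("tn", total - sp - fn), ("fn", fn)]

-- ===== PRECONDITION & SPEC =====
-- Pre_ excludes exactly the inputs where A raises IndexError: actual shorter than
-- predicted while predicted has at least 2 elements (so some pair reads actual
-- at an index past its end).
def Pre_clustering_tfpn (actual : List Int) (predicted : List Int) : Prop :=
  predicted.length ≤ actual.length ∨ predicted.length ≤ 1
instance (actual : List Int) (predicted : List Int) : Decidable (Pre_clustering_tfpn actual predicted) := by unfold Pre_clustering_tfpn; infer_instance
def pvWitness_clustering_tfpn : List Int × List Int := ([0, 1, 0], [1, 1, 2])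

def Spec_clustering_tfpn (actual : List Int) (predicted : List Int) (out : List (String × Int)) : Prop := out = clustering_tfpn_alt actual predicted
instance (actual : List Int) (predicted : List Int) (out : List (String × Int)) : Decidable (Spec_clustering_tfpn actual predicted out) := by unfold Spec_clustering_tfpn; infer_instance

-- ===== CLAIM (what is proved, stated in full; the proofs are below) =====
def Claim_equal_clustering_tfpn : Prop := ∀ (actual : List Int) (predicted : List Int), Dom_clustering_tfpn actual predicted → Pre_clustering_tfpn actual predicted → Spec_clustering_tfpn actual predicted (clustering_tfpn actual predicted)


-- ===== LEMMAS AND PROOFS =====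

-- number of unordered pairs (earlier element x, later element y) with P x y
def pvPairsCnt (P : (Int × Int) → (Int × Int) → Bool) : List (Int × Int) → Nat
  | [] => 0
  | x :: t => t.countP (P x) + pvPairsCnt P t

def pvTP (l : List (Int × Int)) : Nat := pvPairsCnt (fun x y => x.2 == y.2 && x.1 == y.1) l
def pvFP (l : List (Int × Int)) : Nat := pvPairsCnt (fun x y => x.2 == y.2 && !(x.1 == y.1)) l
def pvFN (l : List (Int × Int)) : Nat := pvPairsCnt (fun x y => !(x.2 == y.2) && x.1 == y.1) l
def pvTN (l : List (Int × Int)) : Nat := pvPairsCnt (fun x y => !(x.2 == y.2) && !(x.1 == y.1)) l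
def pvPE (l : List (Int × Int)) : Nat := pvPairsCnt (fun x y => x.2 == y.2) l
def pvAE (l : List (Int × Int)) : Nat := pvPairsCnt (fun x y => x.1 == y.1) l

def pvKey (x y : Int × Int) : String :=
  if x.2 == y.2 then (if x.1 == y.1 then "tp" else "fp")
  else (if x.1 == y.1 then "fn" else "tn")

def pvDD (a b c e : Int) : PySem.Dict String Int :=
  PySem.Dict.mk [("tp", a), ("fp", b), ("tn", c), ("fn", e)]

def pvArec : List (Int × Int) → PySem.Dict String Int → PySem.Dict String Int
  | [], d => d
  | x :: t, d => pvArec t (t.foldl (fun d y => d.modify (pvKey x y) 0 (· + 1)) d)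

theorem pv_countP_split (l : List (Int × Int)) (p q : (Int × Int) → Bool) :
    l.countP p = l.countP (fun y => p y && q y) + l.countP (fun y => p y && !q y) := by
  induction l with
  | nil => simp
  | cons h t ih => by_cases hq : q h <;> by_cases hp : p h <;>
      simp [hq, hp, ih] <;> omega

theorem pvPairsCnt_congr {P Q : (Int × Int) → (Int × Int) → Bool}
    (h : ∀ x y, P x y = Q x y) (l : List (Int × Int)) : pvPairsCnt P l = pvPairsCnt Q l := by
  induction l with
  | nil => rfl
  | cons x t ih =>
      rw [pvPairsCnt, pvPairsCnt, ih, List.countP_congr (fun y _ => by rw [h x y])]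

theorem pvPairsCnt_split (l : List (Int × Int)) (P Q : (Int × Int) → (Int × Int) → Bool) :
    pvPairsCnt P l = pvPairsCnt (fun x y => P x y && Q x y) l
      + pvPairsCnt (fun x y => P x y && !Q x y) l := by
  induction l with
  | nil => rfl
  | cons x t ih => simp [pvPairsCnt, ih, pv_countP_split t (P x) (Q x)]; omega

theorem pvPairsCnt_append_singleton (P : (Int × Int) → (Int × Int) → Bool)
    (l : List (Int × Int)) (x : Int × Int) :
    pvPairsCnt P (l ++ [x]) = pvPairsCnt P l + l.countP (fun y => P y x) := by
  induction l with
  | nil => simp [pvPairsCnt]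
  | cons y t ih =>
      simp [pvPairsCnt, ih, List.countP_append, List.countP_cons]
      omega

theorem pvTrue_choose (l : List (Int × Int)) :
    pvPairsCnt (fun _ _ => true) l = l.length.choose 2 := by
  induction l with
  | nil => rfl
  | cons x t ih =>
      simp [pvPairsCnt, ih, List.countP_true, Nat.choose_succ_succ]

theorem pv_modify_tp (a b c e : Int) : (pvDD a b c e).modify "tp" 0 (· + 1) = pvDD (a+1) b c e := by
  simp [pvDD, PySem.Dict.modify, PySem.Dict.insert, PySem.Dict.getD, PySem.Dict.get?, PySem.Dict.contains]
theorem pv_modify_fp (a b c e : Int) : (pvDD a b c e).modify "fp" 0 (· + 1) = pvDD a (b+1) c e := by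
  simp [pvDD, PySem.Dict.modify, PySem.Dict.insert, PySem.Dict.getD, PySem.Dict.get?, PySem.Dict.contains]
theorem pv_modify_tn (a b c e : Int) : (pvDD a b c e).modify "tn" 0 (· + 1) = pvDD a b (c+1) e := by
  simp [pvDD, PySem.Dict.modify, PySem.Dict.insert, PySem.Dict.getD, PySem.Dict.get?, PySem.Dict.contains]
theorem pv_modify_fn (a b c e : Int) : (pvDD a b c e).modify "fn" 0 (· + 1) = pvDD a b c (e+1) := by
  simp [pvDD, PySem.Dict.modify, PySem.Dict.insert, PySem.Dict.getD, PySem.Dict.get?, PySem.Dict.contains]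

theorem pv_inner_foldl (x : Int × Int) (t : List (Int × Int)) (a b c e : Int) :
    t.foldl (fun d y => d.modify (pvKey x y) 0 (· + 1)) (pvDD a b c e)
      = pvDD (a + t.countP (fun y => x.2 == y.2 && x.1 == y.1))
             (b + t.countP (fun y => x.2 == y.2 && !(x.1 == y.1)))
             (c + t.countP (fun y => !(x.2 == y.2) && !(x.1 == y.1)))
             (e + t.countP (fun y => !(x.2 == y.2) && x.1 == y.1)) := by
  induction t generalizing a b c e with
  | nil => simp
  | cons y t ih =>
      simp only [List.foldl_cons]
      by_cases h2 : x.2 == y.2 <;> by_cases h1 : x.1 == y.1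
      · rw [show (pvDD a b c e).modify (pvKey x y) 0 (· + 1) = pvDD (a+1) b c e by
          simp [pvKey, h2, h1, pv_modify_tp], ih]
        simp [pvDD, h2, h1]; omega
      · rw [show (pvDD a b c e).modify (pvKey x y) 0 (· + 1) = pvDD a (b+1) c e by
          simp [pvKey, h2, h1, pv_modify_fp], ih]
        simp [pvDD, h2, h1]; omega
      · rw [show (pvDD a b c e).modify (pvKey x y) 0 (· + 1) = pvDD a b c (e+1) by
          simp [pvKey, h2, h1, pv_modify_fn], ih]
        simp [pvDD, h2, h1]; omega
      · rw [show (pvDD a b c e).modify (pvKey x y) 0 (· + 1) = pvDD a b (c+1) e by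
          simp [pvKey, h2, h1, pv_modify_tn], ih]
        simp [pvDD, h2, h1]; omega

theorem pvArec_DD (l : List (Int × Int)) (a b c e : Int) :
    pvArec l (pvDD a b c e)
      = pvDD (a + pvTP l) (b + pvFP l) (c + pvTN l) (e + pvFN l) := by
  induction l generalizing a b c e with
  | nil => simp [pvArec, pvTP, pvFP, pvTN, pvFN, pvPairsCnt]
  | cons x t ih =>
      rw [pvArec, pv_inner_foldl, ih]
      simp [pvDD, pvTP, pvFP, pvTN, pvFN, pvPairsCnt]
      omega

theorem pv_range_filter (i n : Int) (h0 : 0 ≤ i) :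
    (PySem.List.pyRange 0 n 1).filter (fun j => decide (i < j)) = PySem.List.pyRange (i+1) n 1 := by
  by_cases hn : i + 1 ≤ n
  · rw [PySem.List.pyRange_one_append 0 (i+1) n (by omega) hn, List.filter_append]
    rw [List.filter_eq_nil_iff.mpr, List.filter_eq_self.mpr, List.nil_append]
    · intro x hx
      rw [PySem.List.mem_pyRange_one] at hx
      simp; omega
    · intro x hx
      rw [PySem.List.mem_pyRange_one] at hx
      simp; omega
  · rw [PySem.List.pyRange_one_eq_nil (a := i+1) (by omega), List.filter_eq_nil_iff.mpr]
    intro x hx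
    rw [PySem.List.mem_pyRange_one] at hx
    simp; omega

theorem pv_zs_get (actual predicted : List Int) (hle : predicted.length ≤ actual.length)
    (k : Int) (h0 : 0 ≤ k) (hk : k < (predicted.length : Int)) :
    PySem.List.pyGetD (actual.zip predicted) k ((0 : Int), (0 : Int))
      = (PySem.List.pyGetD actual k 0, PySem.List.pyGetD predicted k 0) := by
  have hz : (actual.zip predicted).length = predicted.length := by
    rw [List.length_zip]; omega
  rw [PySem.List.pyGetD_eq_getElem _ _ h0 (by rw [hz]; exact hk),
      PySem.List.pyGetD_eq_getElem _ _ h0 (by exact_mod_cast lt_of_lt_of_le hk (by exact_mod_cast hle)),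
      PySem.List.pyGetD_eq_getElem _ _ h0 hk, List.getElem_zip]

theorem pv_inner_range (actual predicted : List Int) (hle : predicted.length ≤ actual.length)
    (i : Int) (h0 : 0 ≤ i) (hi : i < (predicted.length : Int)) (d : PySem.Dict String Int) :
    (PySem.List.pyRange 0 (predicted.length : Int) 1).foldl (fun d j =>
      if i < j then
        if PySem.List.pyGetD predicted i 0 == PySem.List.pyGetD predicted j 0 then
          if PySem.List.pyGetD actual i 0 == PySem.List.pyGetD actual j 0 then
            d.modify "tp" 0 (· + 1)
          else
            d.modify "fp" 0 (· + 1)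
        else
          if PySem.List.pyGetD actual i 0 == PySem.List.pyGetD actual j 0 then
            d.modify "fn" 0 (· + 1)
          else
            d.modify "tn" 0 (· + 1)
      else d) d
    = ((actual.zip predicted).drop (i+1).toNat).foldl
        (fun d y => d.modify
          (pvKey (PySem.List.pyGetD (actual.zip predicted) i ((0:Int),(0:Int))) y) 0 (· + 1)) d := by
  have hz : (actual.zip predicted).length = predicted.length := by
    rw [List.length_zip]; omega
  rw [pv_zs_get actual predicted hle i h0 hi]
  rw [PySem.List.foldl_ite_eq_foldl_filter, pv_range_filter i _ h0]
  rw [PySem.List.foldl_congr_mem _ _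
      (fun (acc : PySem.Dict String Int) (j : Int) =>
        (fun (d : PySem.Dict String Int) (y : Int × Int) =>
          d.modify (pvKey (PySem.List.pyGetD actual i 0, PySem.List.pyGetD predicted i 0) y)
            0 (· + 1))
        acc (PySem.List.pyGetD (actual.zip predicted) j ((0:Int),(0:Int)))) _ ?hg]
  · rw [show (predicted.length : Int) = ((actual.zip predicted).length : Int) by rw [hz]]
    exact PySem.List.foldl_pyRange_pyGetD' (actual.zip predicted) ((0:Int),(0:Int))
      (fun d y => d.modify
        (pvKey (PySem.List.pyGetD actual i 0, PySem.List.pyGetD predicted i 0) y) 0 (· + 1))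
      d (a := i + 1) (by omega)
  case hg =>
    intro acc j hj
    rw [PySem.List.mem_pyRange_one] at hj
    dsimp only
    rw [pv_zs_get actual predicted hle j (by omega) (by omega)]
    simp only [pvKey]
    split_ifs <;> rfl

theorem pv_outer (actual predicted : List Int) (hle : predicted.length ≤ actual.length) :
    ∀ (m : Nat) (a : Int) (d : PySem.Dict String Int), 0 ≤ a → a + m = (predicted.length : Int) →
    (PySem.List.pyRange a (predicted.length : Int) 1).foldl (fun d i =>
      (PySem.List.pyRange 0 (predicted.length : Int) 1).foldl (fun d j =>
      if i < j then
        if PySem.List.pyGetD predicted i 0 == PySem.List.pyGetD predicted j 0 then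
          if PySem.List.pyGetD actual i 0 == PySem.List.pyGetD actual j 0 then
            d.modify "tp" 0 (· + 1)
          else
            d.modify "fp" 0 (· + 1)
        else
          if PySem.List.pyGetD actual i 0 == PySem.List.pyGetD actual j 0 then
            d.modify "fn" 0 (· + 1)
          else
            d.modify "tn" 0 (· + 1)
      else d) d) d
      = pvArec ((actual.zip predicted).drop a.toNat) d := by
  have hz : (actual.zip predicted).length = predicted.length := by
    rw [List.length_zip]; omega
  intro m
  induction m with
  | zero =>
      intro a d h0 hm
      rw [PySem.List.pyRange_one_eq_nil (a := a) (b := (predicted.length : Int)) (by omega),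
          List.foldl_nil, List.drop_eq_nil_of_le (by omega), pvArec]
  | succ k ih =>
      intro a d h0 hm
      rw [PySem.List.pyRange_one_cons (a := a) (b := (predicted.length : Int)) (by omega),
          List.foldl_cons]
      rw [pv_inner_range actual predicted hle a h0 (by omega) d]
      rw [ih (a+1) _ (by omega) (by omega)]
      have hlt : a.toNat < (actual.zip predicted).length := by omega
      rw [show ((actual.zip predicted).drop a.toNat)
            = (actual.zip predicted)[a.toNat] :: (actual.zip predicted).drop (a.toNat + 1)
          from List.drop_eq_getElem_cons hlt, pvArec]
      rw [show (a+1).toNat = a.toNat + 1 by omega,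
          PySem.List.pyGetD_eq_getElem _ _ h0 (by omega)]

theorem pv_A_char (actual predicted : List Int) (hle : predicted.length ≤ actual.length) :
    clustering_tfpn actual predicted
      = [("tp", (pvTP (actual.zip predicted) : Int)),
         ("fp", (pvFP (actual.zip predicted) : Int)),
         ("tn", (pvTN (actual.zip predicted) : Int)),
         ("fn", (pvFN (actual.zip predicted) : Int))] := by
  unfold clustering_tfpn
  dsimp only
  rw [show PySem.Dict.ofList [("tp", (0:Int)), ("fp", 0), ("tn", 0), ("fn", 0)]
        = pvDD 0 0 0 0 from rfl]
  rw [pv_outer actual predicted hle predicted.length 0 (pvDD 0 0 0 0) le_rfl (by omega)]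
  rw [show (0:Int).toNat = 0 from rfl, List.drop_zero, pvArec_DD]
  simp [pvDD]

theorem pv_beq_pair (y x : Int × Int) : (y == x) = (y.2 == x.2 && y.1 == x.1) := by
  rcases y with ⟨y1, y2⟩; rcases x with ⟨x1, x2⟩
  rw [Bool.eq_iff_iff]; simp [and_comm]

theorem pv_count_pair (l : List (Int × Int)) (x : Int × Int) :
    l.count x = l.countP (fun y => y.2 == x.2 && y.1 == x.1) := by
  rw [show l.count x = l.countP (fun y => y == x) from rfl,
      List.countP_congr (fun y _ => by rw [pv_beq_pair y x])]

theorem pv_count_snd (l : List (Int × Int)) (v : Int) :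
    (l.map Prod.snd).count v = l.countP (fun y => y.2 == v) := by
  rw [show (l.map Prod.snd).count v = (l.map Prod.snd).countP (fun u => u == v) from rfl,
      List.countP_map]
  rfl

theorem pv_count_fst (l : List (Int × Int)) (v : Int) :
    (l.map Prod.fst).count v = l.countP (fun y => y.1 == v) := by
  rw [show (l.map Prod.fst).count v = (l.map Prod.fst).countP (fun u => u == v) from rfl,
      List.countP_map]
  rfl

theorem pv_bfold (l : List (Int × Int)) :
    l.foldl
    (fun (s : (Int × Int × Int × Int) ×
              PySem.Dict (Int × Int) Int × PySem.Dict Int Int × PySem.Dict Int Int) x =>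
      ((s.1.1 + s.2.1.getD x 0,
        s.1.2.1 + s.2.2.1.getD x.2 0,
        s.1.2.2.1 + s.2.2.2.getD x.1 0,
        s.1.2.2.2 + 1),
       s.2.1.insert x (s.2.1.getD x 0 + 1),
       s.2.2.1.insert x.2 (s.2.2.1.getD x.2 0 + 1),
       s.2.2.2.insert x.1 (s.2.2.2.getD x.1 0 + 1)))
    ((0, 0, 0, 0), PySem.Dict.empty, PySem.Dict.empty, PySem.Dict.empty)
    = (((pvTP l : Int), (pvPE l : Int), (pvAE l : Int), (l.length : Int)),
       l.foldl (fun d x => d.insert x (d.getD x 0 + 1)) PySem.Dict.empty,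
       (l.map Prod.snd).foldl (fun d v => d.insert v (d.getD v 0 + 1)) PySem.Dict.empty,
       (l.map Prod.fst).foldl (fun d v => d.insert v (d.getD v 0 + 1)) PySem.Dict.empty) := by
  induction l using List.reverseRecOn with
  | nil => simp [pvTP, pvPE, pvAE, pvPairsCnt]
  | append_singleton l x ih =>
      have h1 : pvTP (l ++ [x]) = pvTP l + l.count x := by
        rw [pvTP, pvPairsCnt_append_singleton, ← pv_count_pair]; rfl
      have h2 : pvPE (l ++ [x]) = pvPE l + (l.map Prod.snd).count x.2 := by
        rw [pvPE, pvPairsCnt_append_singleton, ← pv_count_snd]; rfl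
      have h3 : pvAE (l ++ [x]) = pvAE l + (l.map Prod.fst).count x.1 := by
        rw [pvAE, pvPairsCnt_append_singleton, ← pv_count_fst]; rfl
      simp only [List.foldl_append, List.foldl_cons, List.foldl_nil,
        List.map_append, List.map_cons, List.map_nil, ih]
      rw [PySem.Dict.getD_foldl_insert_add_one, PySem.Dict.getD_foldl_insert_add_one,
          PySem.Dict.getD_foldl_insert_add_one]
      simp only [PySem.Dict.getD_empty, Prod.mk.injEq, List.length_append, List.length_cons,
        List.length_nil, h1, h2, h3]
      first
        | trivial
        | exact ⟨⟨by push_cast; ring, by push_cast; ring, by push_cast; ring,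
            by push_cast; ring⟩, by simp⟩

theorem pv_PE_split (l : List (Int × Int)) : pvPE l = pvTP l + pvFP l :=
  pvPairsCnt_split l (fun x y => x.2 == y.2) (fun x y => x.1 == y.1)

theorem pv_AE_split (l : List (Int × Int)) : pvAE l = pvTP l + pvFN l := by
  rw [pvAE, pvPairsCnt_split l (fun x y => x.1 == y.1) (fun x y => x.2 == y.2),
      pvPairsCnt_congr (fun x y => Bool.and_comm _ _) l, pvTP, pvFN,
      pvPairsCnt_congr (Q := fun x y => !(x.2 == y.2) && x.1 == y.1)
        (fun x y => Bool.and_comm _ _) l]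

theorem pv_true_split (l : List (Int × Int)) :
    pvPairsCnt (fun _ _ => true) l = pvPE l + (pvFN l + pvTN l) := by
  rw [pvPairsCnt_split l (fun _ _ => true) (fun x y => x.2 == y.2)]
  rw [pvPairsCnt_congr (Q := fun x y => x.2 == y.2) (fun x y => by simp) l]
  rw [pvPairsCnt_congr (P := fun x y => true && !(x.2 == y.2))
      (Q := fun x y => !(x.2 == y.2)) (fun x y => by simp) l]
  rw [pvPairsCnt_split l (fun x y => !(x.2 == y.2)) (fun x y => x.1 == y.1)]
  rfl

theorem pv_total (L : Nat) :
    PySem.Int.floordiv ((L : Int) * ((L : Int) - 1)) 2 = (L.choose 2 : Int) := by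
  cases L with
  | zero => decide
  | succ k =>
      rw [show (((k+1 : Nat) : Int) * (((k+1 : Nat) : Int) - 1)) = (((k+1) * k : Nat) : Int) by
        push_cast; ring]
      rw [show (2 : Int) = ((2 : Nat) : Int) from rfl, PySem.Int.floordiv_natCast]
      rw [Nat.choose_two_right]
      simp

theorem pv_B_char (actual predicted : List Int) :
    clustering_tfpn_alt actual predicted
      = [("tp", (pvTP (actual.zip predicted) : Int)),
         ("fp", (pvFP (actual.zip predicted) : Int)),
         ("tn", (pvTN (actual.zip predicted) : Int)),
         ("fn", (pvFN (actual.zip predicted) : Int))] := by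
  unfold clustering_tfpn_alt
  rw [pv_bfold]
  dsimp only
  have hpe := pv_PE_split (actual.zip predicted)
  have hae := pv_AE_split (actual.zip predicted)
  have htr := pv_true_split (actual.zip predicted)
  rw [pvTrue_choose] at htr
  rw [pv_total (actual.zip predicted).length]
  have h1 : (pvPE (actual.zip predicted) : Int) - pvTP (actual.zip predicted)
      = pvFP (actual.zip predicted) := by omega
  have h2 : (pvAE (actual.zip predicted) : Int) - pvTP (actual.zip predicted)
      = pvFN (actual.zip predicted) := by omega
  have h3 : ((actual.zip predicted).length.choose 2 : Int) - pvPE (actual.zip predicted)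
      - (pvFN (actual.zip predicted) : Int) = pvTN (actual.zip predicted) := by omega
  rw [h1, h2, h3]

-- ===== VERDICT (by name: the statement is the Claim_ definition above) =====
theorem clustering_tfpn_spec : Claim_equal_clustering_tfpn := by
  intro actual predicted _ hpre
  unfold Spec_clustering_tfpn
  by_cases hle : predicted.length ≤ actual.length
  · rw [pv_A_char actual predicted hle, pv_B_char]
  · have h1 : predicted.length ≤ 1 := by
      rcases hpre with h | h
      · exact absurd h hle
      · exact h
    have hp1 : predicted.length = 1 := by omega
    have ha0 : actual.length = 0 := by omega
    rw [List.length_eq_zero_iff] at ha0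
    subst ha0
    match predicted, hp1 with
    | [p], _ =>
        rw [pv_B_char]
        have hA : clustering_tfpn [] [p] = [("tp", 0), ("fp", 0), ("tn", 0), ("fn", 0)] := by
          unfold clustering_tfpn
          dsimp only
          rw [PySem.List.pyRange_one_cons (a := 0) (b := (([p] : List Int).length : Int))
                (by simp),
              PySem.List.pyRange_one_eq_nil (by simp)]
          simp [List.foldl]
          rfl
        rw [hA]
        simp [pvTP, pvFP, pvTN, pvFN, pvPairsCnt]
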